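-- pv_equiv track=rewrite | github.com/jk-jung/problem-solving | codewars/6kyu/6_A Cinema.py | cinema
-- ===== SOURCE A (Python) =====
-- def cinema(b, g):
--     if b < g:
--         r = cinema(g, b)
--         if r is None: return r
--         return r.replace('G', '1').replace('B', 'G').replace('1', 'B')
--     if b - g <= 1:
--         return 'BG' * g + ('B' if b > g else '')
--     if g == 0: return None
--     r = 'G'
--     g -= 1
--     while b - g >= 2 and b >= 2 and g >= 1:
--         b -= 2
--         g -= 1
--         r += 'BBG'
--     if b - g <= 1: return r + cinema(b, g)
--     return None
-- ===== SOURCE B (Python) =====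
-- def cinema(b, g):
--     # Closed-form reconstruction: normalize to hi >= lo with relabelled letters,
--     # then emit the pattern directly instead of recursing/looping.
--     B, G = ('G', 'B') if b < g else ('B', 'G')
--     hi, lo = (max(b, g), min(b, g))
--     d = hi - lo
--     if d <= 1:
--         return (B + G) * lo + (B if d == 1 else '')
--     if hi >= 2 * lo:
--         return None
--     return G + (B + B + G) * d + (B + G) * (lo - d - 1) + B
-- ===== Notes on version B (the rewrite author's own statement) =====
-- stated objective: faster
-- what changed: Replaces A's recursion (argument swap + three letter-replace passes), greedy while-loop with per-iteration string concatenation and recursive tail call by a closed-form construction: normalize to (hi, lo) with relabelled letters, decide None by one inequality hi >= 2*lo, and emit the pattern directly with string repetition.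
import Mathlib
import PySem

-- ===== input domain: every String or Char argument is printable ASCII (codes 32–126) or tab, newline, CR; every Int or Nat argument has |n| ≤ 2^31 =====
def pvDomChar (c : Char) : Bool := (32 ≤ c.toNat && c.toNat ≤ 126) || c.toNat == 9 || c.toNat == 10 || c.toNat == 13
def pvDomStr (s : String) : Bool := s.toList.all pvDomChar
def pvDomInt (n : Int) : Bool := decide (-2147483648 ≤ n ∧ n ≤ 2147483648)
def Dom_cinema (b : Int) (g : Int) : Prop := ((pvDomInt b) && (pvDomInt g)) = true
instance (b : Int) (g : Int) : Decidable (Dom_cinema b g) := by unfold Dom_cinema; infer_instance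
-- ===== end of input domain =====

-- B replaces A's recursion + greedy while-loop by a closed-form construction; same outputs, simpler.

-- ===== PORT A =====
-- the while-loop of A: while b - g >= 2 and b >= 2 and g >= 1: b -= 2; g -= 1; r += 'BBG'
def cinemaLoop (b g : Int) (r : List Char) : Int × Int × List Char :=
  if 2 ≤ b - g ∧ 2 ≤ b ∧ 1 ≤ g then cinemaLoop (b - 2) (g - 1) (r ++ ['B', 'B', 'G'])
  else (b, g, r)
termination_by g.toNat
decreasing_by omega

-- literal transliteration of A on List Char (strings are handled on the .toList side);
-- the fuel argument only bounds the recursion depth, which for A is at most 3 on every input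
def cinemaFuel : Nat → Int → Int → Option (List Char)
  | 0, _, _ => none
  | fuel + 1, b, g =>
    if b < g then
      match cinemaFuel fuel g b with
      | none => none
      | some r =>
          some (PySem.Chars.replace
                  (PySem.Chars.replace (PySem.Chars.replace r ['G'] ['1']) ['B'] ['G'])
                  ['1'] ['B'])
    else if b - g ≤ 1 then
      some (PySem.List.pyRepeat ['B', 'G'] g ++ (if g < b then ['B'] else []))
    else if g = 0 then none
    else
      if (cinemaLoop b (g - 1) ['G']).1 - (cinemaLoop b (g - 1) ['G']).2.1 ≤ 1 then
        (cinemaFuel fuel (cinemaLoop b (g - 1) ['G']).1 (cinemaLoop b (g - 1) ['G']).2.1).map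
          (fun t => (cinemaLoop b (g - 1) ['G']).2.2 ++ t)
      else none

def cinemaChars (b : Int) (g : Int) : Option (List Char) := cinemaFuel 3 b g

def cinema (b : Int) (g : Int) : Option String := (cinemaChars b g).map String.ofList

-- ===== PORT B =====
def cinemaAltChars (b : Int) (g : Int) : Option (List Char) :=
  let BG : Char × Char := if b < g then ('G', 'B') else ('B', 'G')
  let hi := max b g
  let lo := min b g
  let d := hi - lo
  if d ≤ 1 then
    some (PySem.List.pyRepeat [BG.1, BG.2] lo ++ (if d = 1 then [BG.1] else []))
  else if 2 * lo ≤ hi then none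
  else
    some ([BG.2] ++ PySem.List.pyRepeat [BG.1, BG.1, BG.2] d
            ++ PySem.List.pyRepeat [BG.1, BG.2] (lo - d - 1) ++ [BG.1])

def cinema_alt (b : Int) (g : Int) : Option String := (cinemaAltChars b g).map String.ofList

-- ===== PRECONDITION & SPEC =====
def Spec_cinema (b : Int) (g : Int) (out : Option String) : Prop := out = cinema_alt b g
instance (b : Int) (g : Int) (out : Option String) : Decidable (Spec_cinema b g out) := by unfold Spec_cinema; infer_instance

-- ===== CLAIM (what is proved, stated in full; the proofs are below) =====
def Claim_equal_cinema : Prop := ∀ (b : Int) (g : Int), Dom_cinema b g → Spec_cinema b g (cinema b g)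

-- ===== LEMMAS AND PROOFS =====

theorem cinemaLoop_skip (b g : Int) (r : List Char) (h : g ≤ 0) :
    cinemaLoop b g r = (b, g, r) := by
  rw [cinemaLoop]
  simp [show ¬ (2 ≤ b - g ∧ 2 ≤ b ∧ 1 ≤ g) from by omega]

theorem cinemaLoop_fail_fuel : ∀ (k : Nat) (b g : Int) (r : List Char), g ≤ (k : Int) →
    2 * g + 2 ≤ b → 0 ≤ g → 2 ≤ (cinemaLoop b g r).1 - (cinemaLoop b g r).2.1 := by
  intro k
  induction k with
  | zero =>
    intro b g r hk h1 h2
    rw [cinemaLoop, if_neg (show ¬ (2 ≤ b - g ∧ 2 ≤ b ∧ 1 ≤ g) from by omega)]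
    show (2 : Int) ≤ b - g
    omega
  | succ k ih =>
    intro b g r hk h1 h2
    rw [cinemaLoop]
    by_cases hc : 2 ≤ b - g ∧ 2 ≤ b ∧ 1 ≤ g
    · rw [if_pos hc]
      exact ih (b - 2) (g - 1) _ (by omega) (by omega) (by omega)
    · rw [if_neg hc]
      show (2 : Int) ≤ b - g
      omega

theorem cinemaLoop_fail (b g : Int) (r : List Char) (h1 : 2 * g + 2 ≤ b) (h2 : 0 ≤ g) :
    2 ≤ (cinemaLoop b g r).1 - (cinemaLoop b g r).2.1 :=
  cinemaLoop_fail_fuel g.toNat b g r (by omega) h1 h2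

theorem cinemaLoop_succ (n : Nat) : ∀ (b g : Int) (r : List Char),
    b - g = (n : Int) + 2 → b ≤ 2 * g + 1 →
    cinemaLoop b g r =
      (b - 2 * ((n : Int) + 1), g - ((n : Int) + 1),
        r ++ (List.replicate (n + 1) ['B', 'B', 'G']).flatten) := by
  induction n with
  | zero =>
    intro b g r h1 h2
    rw [cinemaLoop, if_pos (show 2 ≤ b - g ∧ 2 ≤ b ∧ 1 ≤ g from by omega),
      cinemaLoop, if_neg (show ¬ (2 ≤ b - 2 - (g - 1) ∧ 2 ≤ b - 2 ∧ 1 ≤ g - 1) from by omega)]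
    simp
  | succ n ih =>
    intro b g r h1 h2
    rw [cinemaLoop, if_pos (show 2 ≤ b - g ∧ 2 ≤ b ∧ 1 ≤ g from by omega)]
    rw [ih (b - 2) (g - 1) _ (by omega) (by omega)]
    simp only [Prod.mk.injEq]
    refine ⟨by omega, by omega, ?_⟩
    simp [List.replicate_succ, List.append_assoc]

-- PySem.Chars.replace with a one-char pattern rewrites character by character
theorem replace_go_single (c : Char) (ds : List Char) :
    ∀ (fuel : Nat) (l acc : List Char), l.length ≤ fuel →
    PySem.Chars.replace.go [c] ds fuel l acc =
      acc.reverse ++ l.flatMap (fun x => if x = c then ds else [x]) := by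
  intro fuel
  induction fuel with
  | zero =>
    intro l acc h
    have : l = [] := by simpa using List.length_eq_zero_iff.mp (by omega)
    subst this
    simp [PySem.Chars.replace.go]
  | succ fuel ih =>
    intro l acc h
    cases l with
    | nil => simp [PySem.Chars.replace.go]
    | cons c' t =>
      rw [PySem.Chars.replace.go]
      by_cases hc : c' = c
      · subst hc
        simp only [List.isPrefixOf, BEq.rfl, Bool.true_and, if_true, List.length_cons]
        rw [ih _ _ (by simpa using Nat.lt_succ_iff.mp (by simpa using h))]
        simp [List.flatMap_cons]
      · have hpre : [c].isPrefixOf (c' :: t) = false := by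
          simp [List.isPrefixOf]
          exact fun h' => absurd h'.symm hc
        simp only [hpre, Bool.false_eq_true, if_false]
        rw [ih _ _ (by simpa using Nat.lt_succ_iff.mp (by simpa using h))]
        simp [List.flatMap_cons, hc]

theorem replace_single (c d : Char) (s : List Char) :
    PySem.Chars.replace s [c] [d] = s.map (fun x => if x = c then d else x) := by
  rw [PySem.Chars.replace]
  simp only [List.isEmpty_cons, Bool.false_eq_true, if_false]
  rw [replace_go_single c [d] s.length s [] le_rfl]
  simp only [List.reverse_nil, List.nil_append]
  induction s with
  | nil => simp
  | cons x t ih => by_cases hx : x = c <;> simp [List.flatMap_cons, hx, ih]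

-- the replace chain on a {B,G}-string is the letter swap
def pvSw (x : Char) : Char :=
  if (if (if x = 'G' then '1' else x) = 'B' then 'G' else (if x = 'G' then '1' else x)) = '1'
  then 'B'
  else (if (if x = 'G' then '1' else x) = 'B' then 'G' else (if x = 'G' then '1' else x))

theorem replace_chain (s : List Char) :
    PySem.Chars.replace
      (PySem.Chars.replace (PySem.Chars.replace s ['G'] ['1']) ['B'] ['G']) ['1'] ['B']
    = s.map pvSw := by
  rw [replace_single, replace_single, replace_single, List.map_map, List.map_map]
  rfl

theorem map_pyRepeat (f : Char → Char) (xs : List Char) (n : Int) :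
    (PySem.List.pyRepeat xs n).map f = PySem.List.pyRepeat (xs.map f) n := by
  simp [PySem.List.pyRepeat, List.map_flatten, List.map_replicate]

-- the d = 1 base case of A's recursion (any fuel suffices)
theorem cinemaFuel_base (fuel : Nat) (b g : Int) (h : b - g = 1) :
    cinemaFuel (fuel + 1) b g = some (PySem.List.pyRepeat ['B', 'G'] g ++ ['B']) := by
  rw [cinemaFuel, if_neg (show ¬ b < g from by omega),
    if_pos (show b - g ≤ 1 from by omega), if_pos (show g < b from by omega)]

theorem cinemaLoop_skip_diff (b g : Int) (r : List Char) (h : g ≤ 0) (h2 : 2 ≤ b - g) :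
    2 ≤ (cinemaLoop b g r).1 - (cinemaLoop b g r).2.1 := by
  rw [cinemaLoop_skip b g r h]
  simpa using h2

-- A agrees with B's closed form whenever b ≥ g (the non-swapped regime)
theorem cinemaFuel_noswap (fuel : Nat) (b g : Int) (hbg : g ≤ b) :
    cinemaFuel (fuel + 1 + 1) b g = cinemaAltChars b g := by
  have hnlt : ¬ b < g := not_lt.mpr hbg
  rw [cinemaFuel, if_neg hnlt]
  simp only [cinemaAltChars, if_neg hnlt, max_eq_left hbg, min_eq_right hbg]
  by_cases h2 : b - g ≤ 1
  · rw [if_pos h2, if_pos h2]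
    by_cases h1 : b - g = 1
    · rw [if_pos h1, if_pos (show g < b from by omega)]
    · rw [if_neg h1, if_neg (show ¬ g < b from by omega)]
  · rw [if_neg h2, if_neg h2]
    by_cases h3 : 2 * g ≤ b
    · -- failure regime: both sides are none
      rw [if_pos h3]
      by_cases hg0 : g = 0
      · rw [if_pos hg0]
      · rw [if_neg hg0]
        by_cases hgpos : 1 ≤ g
        · have hf := cinemaLoop_fail b (g - 1) ['G'] (by omega) (by omega)
          rw [if_neg (by omega)]
        · have hf := cinemaLoop_skip_diff b (g - 1) ['G'] (by omega) (by omega)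
          rw [if_neg (by omega)]
    · -- success regime: the loop runs b - g iterations and ends one apart
      rw [if_neg h3, if_neg (show ¬ g = 0 from by omega)]
      obtain ⟨n, hn⟩ : ∃ n : Nat, b - g = (n : Int) + 1 := ⟨(b - g - 1).toNat, by omega⟩
      rw [cinemaLoop_succ n b (g - 1) ['G'] (by omega) (by omega)]
      simp only
      rw [if_pos (show b - 2 * ((n : Int) + 1) - (g - 1 - ((n : Int) + 1)) ≤ 1 from by omega)]
      have hb := cinemaFuel_base fuel (b - 2 * ((n : Int) + 1)) (g - 1 - ((n : Int) + 1)) (by omega)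
      rw [hb]
      simp only [Option.map_some]
      have e1 : g - 1 - ((n : Int) + 1) = g - (b - g) - 1 := by omega
      rw [e1]
      have e3 : (List.replicate (n + 1) ['B', 'B', 'G']).flatten
            = PySem.List.pyRepeat ['B', 'B', 'G'] (b - g) := by
        have ht : (b - g).toNat = n + 1 := by omega
        simp [PySem.List.pyRepeat, ht]
      rw [e3]
      simp

-- in the swapped regime, A's replace chain is the letter swap of the closed form
theorem cinemaChars_eq_alt (b g : Int) : cinemaChars b g = cinemaAltChars b g := by
  by_cases hlt : b < g
  · have hnlt : ¬ g < b := not_lt.mpr hlt.le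
    have hns : cinemaFuel (0 + 1 + 1) g b = cinemaAltChars g b := cinemaFuel_noswap 0 g b hlt.le
    show cinemaFuel 3 b g = _
    rw [show (3 : Nat) = 0 + 1 + 1 + 1 from rfl, cinemaFuel, if_pos hlt, hns]
    simp only [cinemaAltChars, if_pos hlt, if_neg hnlt, max_eq_left hlt.le,
      max_eq_right hlt.le, min_eq_left hlt.le, min_eq_right hlt.le]
    by_cases h2 : g - b ≤ 1
    · rw [if_pos h2, if_pos h2]
      by_cases h1 : g - b = 1
      · rw [if_pos h1, if_pos h1]
        simp only [replace_chain]
        simp [map_pyRepeat, pvSw]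
      · rw [if_neg h1, if_neg h1]
        simp only [replace_chain]
        simp [map_pyRepeat, pvSw]
    · rw [if_neg h2, if_neg h2]
      by_cases h3 : 2 * b ≤ g
      · rw [if_pos h3, if_pos h3]
      · rw [if_neg h3, if_neg h3]
        simp only [replace_chain]
        simp [map_pyRepeat, pvSw]
  · exact cinemaFuel_noswap 1 b g (not_lt.mp hlt)

-- ===== VERDICT (by name: the statement is the Claim_ definition above) =====
theorem cinema_spec : Claim_equal_cinema := by
  intro b g _
  unfold Spec_cinema cinema cinema_alt
  rw [cinemaChars_eq_alt]
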